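-- pv_equiv track=rewrite | github.com/SaturnFromTitan/advent_of_code | 2023/day16/part2.py | get_new_positions
-- ===== SOURCE A (Python) =====
-- import enum
--
-- class Direction(enum.StrEnum):
--     LEFT = "LEFT"
--     RIGHT = "RIGHT"
--     UP = "UP"
--     DOWN = "DOWN"
--
-- RayPosition = tuple[int, int, Direction]
--
-- def get_new_positions(
--     symbol: str, position: RayPosition, max_row: int, max_col: int
-- ) -> set[RayPosition]:
--     row, col, direction = position
--     match (direction, symbol):
--         # RIGHT
--         case (Direction.RIGHT, "."):
--             offsets = {(0, 1, Direction.RIGHT)}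
--         case (Direction.RIGHT, "-"):
--             offsets = {(0, 1, Direction.RIGHT)}
--         case (Direction.RIGHT, "|"):
--             offsets = {(-1, 0, Direction.UP), (1, 0, Direction.DOWN)}
--         case (Direction.RIGHT, "/"):
--             offsets = {(-1, 0, Direction.UP)}
--         case (Direction.RIGHT, "\\"):
--             offsets = {(1, 0, Direction.DOWN)}
--         # LEFT
--         case (Direction.LEFT, "."):
--             offsets = {(0, -1, Direction.LEFT)}
--         case (Direction.LEFT, "-"):
--             offsets = {(0, -1, Direction.LEFT)}
--         case (Direction.LEFT, "|"):
--             offsets = {(-1, 0, Direction.UP), (1, 0, Direction.DOWN)}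
--         case (Direction.LEFT, "/"):
--             offsets = {(1, 0, Direction.DOWN)}
--         case (Direction.LEFT, "\\"):
--             offsets = {(-1, 0, Direction.UP)}
--         # UP
--         case (Direction.UP, "."):
--             offsets = {(-1, 0, Direction.UP)}
--         case (Direction.UP, "-"):
--             offsets = {(0, -1, Direction.LEFT), (0, 1, Direction.RIGHT)}
--         case (Direction.UP, "|"):
--             offsets = {(-1, 0, Direction.UP)}
--         case (Direction.UP, "/"):
--             offsets = {(0, 1, Direction.RIGHT)}
--         case (Direction.UP, "\\"):
--             offsets = {(0, -1, Direction.LEFT)}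
--         # DOWN
--         case (Direction.DOWN, "."):
--             offsets = {(1, 0, Direction.DOWN)}
--         case (Direction.DOWN, "-"):
--             offsets = {(0, -1, Direction.LEFT), (0, 1, Direction.RIGHT)}
--         case (Direction.DOWN, "|"):
--             offsets = {(1, 0, Direction.DOWN)}
--         case (Direction.DOWN, "/"):
--             offsets = {(0, -1, Direction.LEFT)}
--         case (Direction.DOWN, "\\"):
--             offsets = {(0, 1, Direction.RIGHT)}
--         case _:
--             raise ValueError("Can't map this direction & symbol")
--
--     return {
--         (row + row_offset, col + col_offset, new_direction)
--         for (row_offset, col_offset, new_direction) in offsets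
--         if is_on_grid(row + row_offset, col + col_offset, max_row, max_col)
--     }
--
-- def is_on_grid(row: int, col: int, max_row: int, max_col: int) -> bool:
--     return 0 <= row <= max_row and 0 <= col <= max_col
-- ===== SOURCE B (Python) =====
-- import enum
--
-- class Direction(enum.StrEnum):
--     LEFT = "LEFT"
--     RIGHT = "RIGHT"
--     UP = "UP"
--     DOWN = "DOWN"
--
-- _VEC = {
--     Direction.RIGHT: (0, 1),
--     Direction.LEFT: (0, -1),
--     Direction.UP: (-1, 0),
--     Direction.DOWN: (1, 0),
-- }
-- _DIR = {v: k for k, v in _VEC.items()}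
--
-- def is_on_grid(row: int, col: int, max_row: int, max_col: int) -> bool:
--     return 0 <= row <= max_row and 0 <= col <= max_col
--
-- def get_new_positions(symbol, position, max_row, max_col):
--     row, col, direction = position
--     try:
--         dr, dc = _VEC[direction]
--     except (KeyError, TypeError):
--         raise ValueError("Can't map this direction & symbol")
--     if symbol == ".":
--         outs = [(dr, dc)]
--     elif symbol == "/":
--         outs = [(-dc, -dr)]
--     elif symbol == "\\":
--         outs = [(dc, dr)]
--     elif symbol == "-":
--         outs = [(dr, dc)] if dr == 0 else [(0, -1), (0, 1)]
--     elif symbol == "|":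
--         outs = [(dr, dc)] if dc == 0 else [(-1, 0), (1, 0)]
--     else:
--         raise ValueError("Can't map this direction & symbol")
--     return {
--         (row + a, col + b, _DIR[(a, b)])
--         for (a, b) in outs
--         if is_on_grid(row + a, col + b, max_row, max_col)
--     }
-- ===== Notes on version B (the rewrite author's own statement) =====
-- stated objective: simpler
-- what changed: Replaces A's 20-case (direction, symbol) match table with velocity-vector arithmetic: the direction becomes a (dr,dc) unit vector, '/' and '\' reflect it as (-dc,-dr)/(dc,dr), '-' and '|' pass aligned beams and split perpendicular ones, then vectors map back to direction names.
import Mathlib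
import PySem

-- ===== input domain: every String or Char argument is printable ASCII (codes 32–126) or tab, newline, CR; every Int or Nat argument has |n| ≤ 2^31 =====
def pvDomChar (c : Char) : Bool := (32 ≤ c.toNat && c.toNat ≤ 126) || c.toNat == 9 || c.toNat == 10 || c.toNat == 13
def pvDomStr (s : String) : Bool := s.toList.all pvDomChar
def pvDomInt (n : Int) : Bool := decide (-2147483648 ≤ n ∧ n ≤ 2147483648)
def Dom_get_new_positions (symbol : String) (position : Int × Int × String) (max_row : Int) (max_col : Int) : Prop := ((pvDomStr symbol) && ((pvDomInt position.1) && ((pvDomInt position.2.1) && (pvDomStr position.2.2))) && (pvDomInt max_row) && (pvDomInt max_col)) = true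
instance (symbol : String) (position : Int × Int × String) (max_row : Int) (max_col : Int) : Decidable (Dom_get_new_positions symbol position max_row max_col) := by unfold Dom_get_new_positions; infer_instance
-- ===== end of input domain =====

-- B replaces A's 20-case (direction, symbol) table by velocity-vector arithmetic (reflect/split the
-- vector per symbol); objective: simpler. Equivalence is over the return value (a Python set).

-- ===== PORT A =====
def is_on_grid (row : Int) (col : Int) (max_row : Int) (max_col : Int) : Bool :=
  decide (0 ≤ row ∧ row ≤ max_row) && decide (0 ≤ col ∧ col ≤ max_col)

def get_new_positions (symbol : String) (position : Int × Int × String) (max_row : Int) (max_col : Int) : List (Int × Int × String) :=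
  let row := position.1
  let col := position.2.1
  let direction := position.2.2
  let offsets : List (Int × Int × String) :=
    -- RIGHT
    if direction = "RIGHT" ∧ symbol = "." then [(0, 1, "RIGHT")]
    else if direction = "RIGHT" ∧ symbol = "-" then [(0, 1, "RIGHT")]
    else if direction = "RIGHT" ∧ symbol = "|" then [(-1, 0, "UP"), (1, 0, "DOWN")]
    else if direction = "RIGHT" ∧ symbol = "/" then [(-1, 0, "UP")]
    else if direction = "RIGHT" ∧ symbol = "\\" then [(1, 0, "DOWN")]
    -- LEFT
    else if direction = "LEFT" ∧ symbol = "." then [(0, -1, "LEFT")]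
    else if direction = "LEFT" ∧ symbol = "-" then [(0, -1, "LEFT")]
    else if direction = "LEFT" ∧ symbol = "|" then [(-1, 0, "UP"), (1, 0, "DOWN")]
    else if direction = "LEFT" ∧ symbol = "/" then [(1, 0, "DOWN")]
    else if direction = "LEFT" ∧ symbol = "\\" then [(-1, 0, "UP")]
    -- UP
    else if direction = "UP" ∧ symbol = "." then [(-1, 0, "UP")]
    else if direction = "UP" ∧ symbol = "-" then [(0, -1, "LEFT"), (0, 1, "RIGHT")]
    else if direction = "UP" ∧ symbol = "|" then [(-1, 0, "UP")]
    else if direction = "UP" ∧ symbol = "/" then [(0, 1, "RIGHT")]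
    else if direction = "UP" ∧ symbol = "\\" then [(0, -1, "LEFT")]
    -- DOWN
    else if direction = "DOWN" ∧ symbol = "." then [(1, 0, "DOWN")]
    else if direction = "DOWN" ∧ symbol = "-" then [(0, -1, "LEFT"), (0, 1, "RIGHT")]
    else if direction = "DOWN" ∧ symbol = "|" then [(1, 0, "DOWN")]
    else if direction = "DOWN" ∧ symbol = "/" then [(0, -1, "LEFT")]
    else if direction = "DOWN" ∧ symbol = "\\" then [(0, 1, "RIGHT")]
    else []  -- Python raises ValueError here; excluded by Pre_
  PySem.Set.ofList
    ((offsets.map (fun o => (row + o.1, col + o.2.1, o.2.2))).filter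
      (fun t => is_on_grid t.1 t.2.1 max_row max_col))

-- ===== PORT B =====
-- _VEC lookup of Source B
def pvVecOf (direction : String) : Option (Int × Int) :=
  if direction = "RIGHT" then some (0, 1)
  else if direction = "LEFT" then some (0, -1)
  else if direction = "UP" then some (-1, 0)
  else if direction = "DOWN" then some (1, 0)
  else none

-- _DIR lookup of Source B (only called on the four unit vectors)
def pvDirOf (v : Int × Int) : String :=
  if v = (0, 1) then "RIGHT"
  else if v = (0, -1) then "LEFT"
  else if v = (-1, 0) then "UP"
  else "DOWN"

def get_new_positions_alt (symbol : String) (position : Int × Int × String) (max_row : Int) (max_col : Int) : List (Int × Int × String) :=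
  let row := position.1
  let col := position.2.1
  let direction := position.2.2
  match pvVecOf direction with
  | none => []  -- Source B raises ValueError here; excluded by Pre_
  | some (dr, dc) =>
    let outs : List (Int × Int) :=
      if symbol = "." then [(dr, dc)]
      else if symbol = "/" then [(-dc, -dr)]
      else if symbol = "\\" then [(dc, dr)]
      else if symbol = "-" then (if dr = 0 then [(dr, dc)] else [(0, -1), (0, 1)])
      else if symbol = "|" then (if dc = 0 then [(dr, dc)] else [(-1, 0), (1, 0)])
      else []  -- Source B raises ValueError here; excluded by Pre_
    PySem.Set.ofList
      ((outs.map (fun v => (row + v.1, col + v.2, pvDirOf v))).filter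
        (fun t => is_on_grid t.1 t.2.1 max_row max_col))

-- ===== PRECONDITION & SPEC =====
-- Pre_ excludes exactly the inputs where A raises ValueError: an unrecognised symbol or direction.
def Pre_get_new_positions (symbol : String) (position : Int × Int × String) (max_row : Int) (max_col : Int) : Prop :=
  (symbol = "." ∨ symbol = "-" ∨ symbol = "|" ∨ symbol = "/" ∨ symbol = "\\") ∧
  (position.2.2 = "RIGHT" ∨ position.2.2 = "LEFT" ∨ position.2.2 = "UP" ∨ position.2.2 = "DOWN")
instance (symbol : String) (position : Int × Int × String) (max_row : Int) (max_col : Int) : Decidable (Pre_get_new_positions symbol position max_row max_col) := by unfold Pre_get_new_positions; infer_instance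

def pvWitness_get_new_positions : String × (Int × Int × String) × Int × Int := ("|", (1, 1, "RIGHT"), 3, 3)

def Spec_get_new_positions (symbol : String) (position : Int × Int × String) (max_row : Int) (max_col : Int) (out : List (Int × Int × String)) : Prop := out = get_new_positions_alt symbol position max_row max_col
instance (symbol : String) (position : Int × Int × String) (max_row : Int) (max_col : Int) (out : List (Int × Int × String)) : Decidable (Spec_get_new_positions symbol position max_row max_col out) := by unfold Spec_get_new_positions; infer_instance

-- ===== CLAIM (what is proved, stated in full; the proofs are below) =====
def Claim_equal_get_new_positions : Prop := ∀ (symbol : String) (position : Int × Int × String) (max_row : Int) (max_col : Int), Dom_get_new_positions symbol position max_row max_col → Pre_get_new_positions symbol position max_row max_col → Spec_get_new_positions symbol position max_row max_col (get_new_positions symbol position max_row max_col)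

-- ===== LEMMAS AND PROOFS =====

-- ===== VERDICT (by name: the statement is the Claim_ definition above) =====
theorem get_new_positions_spec : Claim_equal_get_new_positions := by
  intro symbol position max_row max_col _ hpre
  obtain ⟨hs, hd⟩ := hpre
  unfold Spec_get_new_positions
  rcases hd with hd | hd | hd | hd <;> rcases hs with hs | hs | hs | hs | hs <;>
    simp [get_new_positions, get_new_positions_alt, pvVecOf, pvDirOf, hs, hd]
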